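-- pv_equiv track=rewrite | github.com/Datejl/Jane-Clanker-Public--Jadee- | features/staff/orbat/sheets.py | _sectionBounds
-- ===== SOURCE A (Python) =====
-- from typing import Optional, Dict, Any
--
-- def _sectionBounds(headers: Dict[str, int], totalRows: int) -> Dict[str, tuple[int, int]]:
--     ordered = sorted(headers.items(), key=lambda item: item[1])
--     bounds: Dict[str, tuple[int, int]] = {}
--     for idx, (name, row) in enumerate(ordered):
--         start = row + 1
--         end = totalRows
--         if idx + 1 < len(ordered):
--             end = ordered[idx + 1][1] - 1
--         bounds[name] = (start, end)
--     return bounds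
-- ===== SOURCE B (Python) =====
-- def _sectionBounds(headers, totalRows):
--     # Selection-based: repeatedly extract the earliest minimum-row header and
--     # compute its section end as the smallest remaining row minus one.
--     remaining = list(headers.items())
--     bounds = {}
--     while remaining:
--         name, row = min(remaining, key=lambda it: it[1])
--         remaining = [it for it in remaining if it[0] != name]
--         if remaining:
--             end = min(r for _, r in remaining) - 1
--         else:
--             end = totalRows
--         bounds[name] = (row + 1, end)
--     return bounds
-- ===== Notes on version B (the rewrite author's own statement) =====
-- stated objective: alternative
-- what changed: Replaces A's sort-then-forward-scan with lookahead by a selection algorithm: no sort at all, B repeatedly extracts the earliest minimum-row header from the remaining items and bounds its section by the smallest remaining row minus one.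
import Mathlib
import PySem

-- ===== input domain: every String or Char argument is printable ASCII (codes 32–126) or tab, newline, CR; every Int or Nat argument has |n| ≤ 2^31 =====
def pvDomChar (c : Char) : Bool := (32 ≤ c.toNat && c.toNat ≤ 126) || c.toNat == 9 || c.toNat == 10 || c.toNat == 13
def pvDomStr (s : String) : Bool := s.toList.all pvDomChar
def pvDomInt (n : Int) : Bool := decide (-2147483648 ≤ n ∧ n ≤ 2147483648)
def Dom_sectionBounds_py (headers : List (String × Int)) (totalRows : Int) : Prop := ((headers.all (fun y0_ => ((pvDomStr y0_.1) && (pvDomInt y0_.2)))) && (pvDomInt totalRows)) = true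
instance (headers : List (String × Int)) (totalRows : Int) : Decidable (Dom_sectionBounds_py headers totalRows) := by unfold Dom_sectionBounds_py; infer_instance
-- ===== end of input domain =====

-- B replaces A's sort-then-lookahead by a selection algorithm: repeatedly extract the
-- earliest minimum-row header and bound its section by the smallest remaining row
-- (objective: alternative algorithm, no sort call; B is not faster than A).

-- ===== PORT A =====
-- literal port of A: sort items by row, enumerate forward, look ahead to ordered[idx+1]
-- (the pyGetD default is never used: the guard idx+1 < len ensures the index is in range)
def sectionBounds_py (headers : List (String × Int)) (totalRows : Int) : List (String × Int × Int) :=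
  let ordered := PySem.List.sorted (PySem.Dict.ofList headers).items (fun item => item.2) false
  let bounds := (PySem.List.enumerate ordered 0).foldl
    (fun (b : PySem.Dict String (Int × Int)) a =>
      let start := a.2.2 + 1
      let e := if a.1 + 1 < (ordered.length : Int) then (PySem.List.pyGetD ordered (a.1 + 1) ("", 0)).2 - 1 else totalRows
      b.insert a.2.1 (start, e))
    PySem.Dict.empty
  bounds.items

-- ===== PORT B =====
-- literal port of Source B's while loop: select the first minimum-row item (Python min with key),
-- drop it by name, and take min of the remaining rows for the end (min? = none exactly when
-- Python's `if remaining:` guard takes the else-branch).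
theorem pv_filter_ne_len_lt (L : List (String × Int)) (m : String × Int) (hm : m ∈ L) :
    (L.filter (fun it => it.1 != m.1)).length < L.length :=
  List.length_filter_lt_length_iff_exists.mpr ⟨m, hm, by simp⟩

def sbLoop (remaining : List (String × Int)) (bounds : PySem.Dict String (Int × Int)) (totalRows : Int) : PySem.Dict String (Int × Int) :=
  match hm : PySem.List.min? remaining (fun it => it.2) with
  | none => bounds
  | some m =>
    let rest := remaining.filter (fun it => it.1 != m.1)
    let e := match PySem.List.min? (rest.map Prod.snd) (fun r => r) with
      | none => totalRows
      | some r => r - 1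
    sbLoop rest (bounds.insert m.1 (m.2 + 1, e)) totalRows
termination_by remaining.length
decreasing_by
  rw [List.length_unattach, ← List.countP_eq_length_filter,
      List.countP_attach (l := remaining) (p := fun it => it.1 != m.1),
      List.countP_eq_length_filter]
  exact pv_filter_ne_len_lt remaining m (PySem.List.min?_mem hm)

def sectionBounds_py_alt (headers : List (String × Int)) (totalRows : Int) : List (String × Int × Int) :=
  (sbLoop (PySem.Dict.ofList headers).items PySem.Dict.empty totalRows).items

-- ===== PRECONDITION & SPEC =====
def Spec_sectionBounds_py (headers : List (String × Int)) (totalRows : Int) (out : List (String × Int × Int)) : Prop := out = sectionBounds_py_alt headers totalRows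
instance (headers : List (String × Int)) (totalRows : Int) (out : List (String × Int × Int)) : Decidable (Spec_sectionBounds_py headers totalRows out) := by unfold Spec_sectionBounds_py; infer_instance

-- ===== CLAIM (what is proved, stated in full; the proofs are below) =====
def Claim_equal_sectionBounds_py : Prop := ∀ (headers : List (String × Int)) (totalRows : Int), Dom_sectionBounds_py headers totalRows → Spec_sectionBounds_py headers totalRows (sectionBounds_py headers totalRows)

-- ===== LEMMAS AND PROOFS =====

-- common reference function: section bounds of an (already sorted) header list
def hRec : List (String × Int) → Int → List (String × Int × Int)
  | [], _ => []
  | [x], tot => [(x.1, x.2 + 1, tot)]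
  | x :: y :: r, tot => (x.1, x.2 + 1, y.2 - 1) :: hRec (y :: r) tot

theorem hRec_length (L : List (String × Int)) (tot : Int) : (hRec L tot).length = L.length := by
  induction L with
  | nil => rfl
  | cons x xs ih =>
    cases xs with
    | nil => rfl
    | cons y r => simp [hRec] at ih ⊢; omega

theorem map_fst_hRec (L : List (String × Int)) (tot : Int) : (hRec L tot).map (·.1) = L.map (·.1) := by
  induction L with
  | nil => rfl
  | cons x xs ih =>
    cases xs with
    | nil => rfl
    | cons y r => simpa [hRec] using congrArg (List.cons x.1) ih

theorem hRec_getElem (L : List (String × Int)) (tot : Int) (j : Nat) (hj : j < L.length) :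
    (hRec L tot)[j]'(by rw [hRec_length]; exact hj) =
      (L[j].1, L[j].2 + 1, if h : j + 1 < L.length then L[j+1].2 - 1 else tot) := by
  induction L generalizing j with
  | nil => simp at hj
  | cons x xs ih =>
    cases xs with
    | nil =>
      cases j with
      | zero => simp [hRec]
      | succ k => simp at hj
    | cons y r =>
      cases j with
      | zero => simp [hRec]
      | succ k =>
        have hk : k < (y :: r).length := by simpa using hj
        simp only [hRec, List.getElem_cons_succ]
        rw [ih k hk]
        have hcond : k + 1 + 1 < (x :: y :: r).length ↔ k + 1 < (y :: r).length := by
          simp only [List.length_cons]; omega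
        by_cases h : k + 1 < (y :: r).length
        · rw [dif_pos h, dif_pos (hcond.mpr h)]
          simp
        · rw [dif_neg h, dif_neg (fun hc => h (hcond.mp hc))]

-- A's fold over the enumerated sorted list is hRec
theorem aMap_eq_hRec (L : List (String × Int)) (tot : Int) :
    (PySem.List.enumerate L 0).map
      (fun a => (a.2.1, a.2.2 + 1,
        if a.1 + 1 < (L.length : Int) then (PySem.List.pyGetD L (a.1 + 1) ("", 0)).2 - 1 else tot))
      = hRec L tot := by
  apply List.ext_getElem
  · simp [PySem.List.length_enumerate, hRec_length]
  · intro j h1 h2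
    have hj : j < L.length := by simpa [PySem.List.length_enumerate] using h1
    rw [List.getElem_map, PySem.List.getElem_enumerate, hRec_getElem L tot j hj]
    simp only [zero_add]
    by_cases hlt : j + 1 < L.length
    · have hlt' : (j : Int) + 1 < (L.length : Int) := by exact_mod_cast hlt
      rw [if_pos hlt', dif_pos hlt]
      rw [PySem.List.pyGetD_eq_getElem L ("", 0) (by positivity) (by exact_mod_cast hlt)]
      norm_num
    · have hlt' : ¬ ((j : Int) + 1 < (L.length : Int)) := by exact_mod_cast hlt
      rw [if_neg hlt', dif_neg hlt]

theorem nodup_fst_sorted (headers : List (String × Int)) :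
    ((PySem.List.sorted (PySem.Dict.ofList headers).items (fun item => item.2) false).map (·.1)).Nodup := by
  have hperm := (PySem.List.sorted_perm (PySem.Dict.ofList headers).items (fun item => item.2) false).map (·.1)
  exact hperm.nodup_iff.mpr (PySem.Dict.nodup_keys_ofList headers)

-- ---- B-side: selection equals stable sort, head by head ----

theorem min?_snoc_some {xs : List (String × Int)} {x m : String × Int}
    (h : PySem.List.min? xs (fun p => p.2) = some m) :
    PySem.List.min? (xs ++ [x]) (fun p => p.2)
      = if x.2 < m.2 then some x else some m := by
  simp only [PySem.List.min?] at h ⊢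
  rw [List.foldl_append, h]
  rfl

theorem sorted_snoc (xs : List (String × Int)) (x : String × Int) :
    PySem.List.sorted (xs ++ [x]) (fun p => p.2) false
      = PySem.List.insertBy (fun a b => decide (a.2 < b.2)) x
          (PySem.List.sorted xs (fun p => p.2) false) := by
  simp [PySem.List.sorted, List.foldl_append]

theorem insertBy_cons (x y : String × Int) (ys : List (String × Int)) :
    PySem.List.insertBy (fun a b => decide (a.2 < b.2)) x (y :: ys)
      = if x.2 < y.2 then x :: y :: ys
        else y :: PySem.List.insertBy (fun a b => decide (a.2 < b.2)) x ys := by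
  simp [PySem.List.insertBy]

-- stability: the head of the stable sort is the FIRST minimal element (= Python min),
-- and dropping it by name from the input sorts to exactly the tail
theorem sel_sorted (L : List (String × Int)) (hnd : (L.map (·.1)).Nodup)
    (m : String × Int) (t : List (String × Int))
    (h : PySem.List.sorted L (fun p => p.2) false = m :: t) :
    PySem.List.min? L (fun p => p.2) = some m ∧
      PySem.List.sorted (L.filter (fun p => p.1 != m.1)) (fun p => p.2) false = t := by
  induction L using List.reverseRecOn generalizing m t with
  | nil => simp [PySem.List.sorted] at h
  | append_singleton xs x ih =>
    have hnd' : ((xs.map (·.1)) ++ [x.1]).Nodup := by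
      simpa using hnd
    have hndxs : (xs.map (·.1)).Nodup := (List.nodup_append.mp hnd').1
    have hxnot : x.1 ∉ xs.map (·.1) := by
      have hdisj := (List.nodup_append.mp hnd').2.2
      intro hmem
      exact hdisj _ hmem _ (List.mem_singleton.mpr rfl) rfl
    rw [sorted_snoc] at h
    cases hs : PySem.List.sorted xs (fun p => p.2) false with
    | nil =>
      have hxs : xs = [] := (PySem.List.sorted_eq_nil_iff _ _ _).mp hs
      subst hxs
      rw [hs] at h
      simp only [PySem.List.insertBy] at h
      obtain ⟨h1, h2⟩ := List.cons.inj h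
      subst h1
      subst h2
      refine ⟨rfl, by simp [PySem.List.sorted]⟩
    | cons m' t' =>
      obtain ⟨ihmin, ihfilt⟩ := ih hndxs m' t' hs
      have hm'mem : m' ∈ xs := PySem.List.min?_mem ihmin
      have hne : x.1 ≠ m'.1 := by
        intro hcontra
        exact hxnot (hcontra ▸ List.mem_map.mpr ⟨m', hm'mem, rfl⟩)
      rw [hs, insertBy_cons] at h
      by_cases hlt : x.2 < m'.2
      · rw [if_pos hlt] at h
        obtain ⟨h1, h2⟩ := List.cons.inj h
        subst h1
        subst h2
        constructor
        · rw [min?_snoc_some ihmin, if_pos hlt]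
        · have hfilt : (xs ++ [x]).filter (fun p => p.1 != x.1) = xs := by
            rw [List.filter_append]
            have hl : xs.filter (fun p => p.1 != x.1) = xs := by
              apply List.filter_eq_self.mpr
              intro p hp
              simp only [bne_iff_ne, ne_eq]
              intro hcontra
              exact hxnot (hcontra ▸ List.mem_map.mpr ⟨p, hp, rfl⟩)
            rw [hl]
            simp
          rw [hfilt, hs]
      · rw [if_neg hlt] at h
        obtain ⟨h1, h2⟩ := List.cons.inj h
        subst h1
        subst h2
        constructor
        · rw [min?_snoc_some ihmin, if_neg hlt]
        · have hfilt : (xs ++ [x]).filter (fun p => p.1 != m'.1)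
              = xs.filter (fun p => p.1 != m'.1) ++ [x] := by
            rw [List.filter_append]
            congr 1
            simp [hne]
          rw [hfilt, sorted_snoc, ihfilt]

-- filtering preserves name-nodup
theorem nodup_fst_filter (L : List (String × Int)) (hnd : (L.map (·.1)).Nodup) (p : String × Int → Bool) :
    ((L.filter p).map (·.1)).Nodup :=
  hnd.sublist (List.Sublist.map (·.1) (List.filter_sublist (l := L)))

-- the smallest remaining row is the row of the sorted tail's head
theorem min_rows_eq_head (rest : List (String × Int)) (y : String × Int) (t : List (String × Int))
    (hs : PySem.List.sorted rest (fun p => p.2) false = y :: t) :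
    PySem.List.min? (rest.map Prod.snd) (fun r => r) = some y.2 := by
  cases hv : PySem.List.min? (rest.map Prod.snd) (fun r => r) with
  | none =>
    have : rest.map Prod.snd = [] := (PySem.List.min?_eq_none_iff _ _).mp hv
    have : rest = [] := by simpa using this
    rw [this] at hs
    simp [PySem.List.sorted] at hs
  | some v =>
    have hvmem : v ∈ rest.map Prod.snd := PySem.List.min?_mem hv
    have hvmin : ∀ r ∈ rest.map Prod.snd, v ≤ r := by
      intro r hr
      exact PySem.List.min?_isMin hv r hr
    have hperm : (y :: t).Perm rest := hs ▸ PySem.List.sorted_perm rest (fun p => p.2) false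
    have hymem : y.2 ∈ rest.map Prod.snd :=
      List.mem_map.mpr ⟨y, hperm.mem_iff.mp (by simp), rfl⟩
    have hpw : (y :: t).Pairwise (fun a b => a.2 ≤ b.2) :=
      hs ▸ PySem.List.sorted_pairwise rest (fun p => p.2)
    have hymin : ∀ r ∈ rest.map Prod.snd, y.2 ≤ r := by
      intro r hr
      obtain ⟨q, hq, hqr⟩ := List.mem_map.mp hr
      have hq' : q ∈ y :: t := hperm.mem_iff.mpr hq
      rcases List.mem_cons.mp hq' with h1 | h2
      · subst h1; omega
      · subst hqr
        exact (List.pairwise_cons.mp hpw).1 q h2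
    have : v = y.2 := le_antisymm (hvmin y.2 hymem) (hymin v hvmem)
    rw [this]

-- the selection loop inserts exactly the hRec entries of the sorted list, in order
theorem sbLoop_eq (L : List (String × Int)) (hnd : (L.map (·.1)).Nodup)
    (d : PySem.Dict String (Int × Int)) (tot : Int) :
    sbLoop L d tot
      = (hRec (PySem.List.sorted L (fun p => p.2) false) tot).foldl
          (fun b p => b.insert p.1 p.2) d := by
  induction hlen : L.length using Nat.strong_induction_on generalizing L d with
  | _ n ih =>
    rw [sbLoop.eq_def]
    cases hm : PySem.List.min? L (fun it => it.2) with
    | none =>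
      have hL : L = [] := (PySem.List.min?_eq_none_iff _ _).mp hm
      subst hL
      simp [PySem.List.sorted, hRec]
    | some m =>
      have hLne : L ≠ [] := by
        intro hL; rw [hL] at hm; simp [PySem.List.min?] at hm
      cases hs : PySem.List.sorted L (fun p => p.2) false with
      | nil => exact absurd ((PySem.List.sorted_eq_nil_iff _ _ _).mp hs) hLne
      | cons m0 t =>
        obtain ⟨hmin0, hfilt⟩ := sel_sorted L hnd m0 t hs
        have hmm : m0 = m := by
          rw [hm] at hmin0; exact (Option.some.inj hmin0).symm
        subst hmm
        have hrestnd : ((L.filter (fun it => it.1 != m0.1)).map (·.1)).Nodup :=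
          nodup_fst_filter L hnd _
        have hrestlen : (L.filter (fun it => it.1 != m0.1)).length < n := by
          rw [← hlen]
          exact pv_filter_ne_len_lt L m0 (PySem.List.min?_mem hm)
        have hrec := ih _ hrestlen (L.filter (fun it => it.1 != m0.1)) hrestnd
          (d.insert m0.1 (m0.2 + 1,
            match PySem.List.min? ((L.filter (fun it => it.1 != m0.1)).map Prod.snd) (fun r => r) with
            | none => tot
            | some r => r - 1)) rfl
        show sbLoop (L.filter (fun it => it.1 != m0.1))
            (d.insert m0.1 (m0.2 + 1,
              match PySem.List.min? ((L.filter (fun it => it.1 != m0.1)).map Prod.snd) (fun r => r) with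
              | none => tot
              | some r => r - 1)) tot
          = List.foldl (fun b p => b.insert p.1 p.2) d (hRec (m0 :: t) tot)
        rw [hrec, hfilt]
        cases t with
        | nil =>
          have hrest : L.filter (fun it => it.1 != m0.1) = [] :=
            (PySem.List.sorted_eq_nil_iff _ _ _).mp hfilt
          rw [hrest]
          simp [hRec, PySem.List.min?]
        | cons y t' =>
          rw [min_rows_eq_head _ y t' hfilt]
          simp [hRec]

-- ===== VERDICT (by name: the statement is the Claim_ definition above) =====
theorem sectionBounds_py_spec : Claim_equal_sectionBounds_py := by
  intro headers totalRows _
  unfold Spec_sectionBounds_py sectionBounds_py sectionBounds_py_alt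
  set L := (PySem.Dict.ofList headers).items with hLdef
  have hnd : (L.map (·.1)).Nodup := PySem.Dict.nodup_keys_ofList headers
  set S := PySem.List.sorted L (fun item => item.2) false with hS
  have hndS : (S.map (·.1)).Nodup := nodup_fst_sorted headers
  -- A side: inserting pairwise-distinct fresh keys into an empty dict appends them in order
  have hA : ((PySem.List.enumerate S 0).foldl
      (fun (b : PySem.Dict String (Int × Int)) a =>
        b.insert a.2.1 (a.2.2 + 1,
          if a.1 + 1 < (S.length : Int) then (PySem.List.pyGetD S (a.1 + 1) ("", 0)).2 - 1 else totalRows))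
      PySem.Dict.empty).items
      = (PySem.List.enumerate S 0).map
          (fun a => (a.2.1, a.2.2 + 1,
            if a.1 + 1 < (S.length : Int) then (PySem.List.pyGetD S (a.1 + 1) ("", 0)).2 - 1 else totalRows)) := by
    have hkeys : ((PySem.List.enumerate S 0).map (fun a => a.2.1)).Nodup := by
      have h1 : (PySem.List.enumerate S 0).map (fun a => a.2.1)
          = ((PySem.List.enumerate S 0).map (·.2)).map (·.1) := by
        rw [List.map_map]; rfl
      rw [h1, PySem.List.map_snd_enumerate]
      exact hndS
    simpa using PySem.Dict.items_foldl_insert_fresh (PySem.List.enumerate S 0)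
      (fun a => a.2.1)
      (fun a => (a.2.2 + 1,
        if a.1 + 1 < (S.length : Int) then (PySem.List.pyGetD S (a.1 + 1) ("", 0)).2 - 1 else totalRows))
      PySem.Dict.empty (by simp) hkeys
  -- B side: the selection loop builds exactly the hRec entries of the sorted list
  have hB : (sbLoop L PySem.Dict.empty totalRows).items = hRec S totalRows := by
    rw [sbLoop_eq L hnd PySem.Dict.empty totalRows]
    have hkeys : ((hRec S totalRows).map (·.1)).Nodup := by
      rw [map_fst_hRec]; exact hndS
    have := PySem.Dict.items_foldl_insert_fresh (hRec S totalRows)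
      (fun p => p.1) (fun p => p.2) (PySem.Dict.empty (κ := String) (ν := Int × Int))
      (by simp) hkeys
    simpa using this
  rw [hB]
  exact hA.trans (aMap_eq_hRec S totalRows)
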